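-- pv_equiv track=rewrite | github.com/stiles/guessr-meta-generator | scripts/reorder_clues.py | categorize_clues
-- ===== SOURCE A (Python) =====
-- CATEGORIES = {
--     "Identity & symbols": [
--         "language", "capital", "capital_status", "tld", "flag", "culture", "miscellaneous"
--     ],
--     "Environment & landscape": [
--         "coverage", "foliage", "topography", "environment", "infrastructure"
--     ],
--     "Roads & transportation": [
--         "cars", "driving", "signs", "bollards", "poles", "stop"
--     ]
-- }
--
-- def categorize_clues(clues):
--     """
--     Group geoguessr_clues into predefined categories.
--     """
--     categorized_clues = {category: {} for category in CATEGORIES}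
--
--     for key, value in clues.items():
--         for category, fields in CATEGORIES.items():
--             if key in fields:
--                 categorized_clues[category][key] = value
--                 break
--
--     return categorized_clues
-- ===== SOURCE B (Python) =====
-- CATEGORIES = {
--     "Identity & symbols": [
--         "language", "capital", "capital_status", "tld", "flag", "culture", "miscellaneous"
--     ],
--     "Environment & landscape": [
--         "coverage", "foliage", "topography", "environment", "infrastructure"
--     ],
--     "Roads & transportation": [
--         "cars", "driving", "signs", "bollards", "poles", "stop"
--     ]
-- }
--
-- def categorize_clues(clues):
--     """
--     Group geoguessr_clues into predefined categories:
--     for each category, keep the clues whose key belongs to it.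
--     """
--     return {
--         category: {key: value for key, value in clues.items() if key in fields}
--         for category, fields in CATEGORIES.items()
--     }
-- ===== Notes on version B (the rewrite author's own statement) =====
-- stated objective: simpler
-- what changed: B inverts the loop structure: instead of A's pass over clues with an inner scan over CATEGORIES and mutation of pre-built empty dicts, B is a single dict comprehension over CATEGORIES that filters clues per category; this is correct because the category field lists are pairwise disjoint, so first-match placement equals per-category filtering.
import Mathlib
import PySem

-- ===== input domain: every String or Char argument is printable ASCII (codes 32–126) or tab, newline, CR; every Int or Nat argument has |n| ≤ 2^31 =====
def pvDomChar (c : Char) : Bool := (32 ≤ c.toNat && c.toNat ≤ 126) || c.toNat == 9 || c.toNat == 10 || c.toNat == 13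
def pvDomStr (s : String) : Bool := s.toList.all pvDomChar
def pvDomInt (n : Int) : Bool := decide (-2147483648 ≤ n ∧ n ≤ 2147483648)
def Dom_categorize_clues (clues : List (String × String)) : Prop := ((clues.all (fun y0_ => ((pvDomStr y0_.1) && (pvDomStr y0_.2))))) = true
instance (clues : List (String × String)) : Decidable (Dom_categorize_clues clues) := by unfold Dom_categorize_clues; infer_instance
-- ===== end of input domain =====

-- B inverts the loop structure: one dict comprehension over CATEGORIES filtering clues per
-- category, instead of A's pass over clues with an inner first-match scan over CATEGORIES
-- mutating pre-built empty dicts (objective: simpler; correct since the field lists are disjoint).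

-- ===== PORT A =====
def pvCATEGORIES : List (String × List String) :=
  [("Identity & symbols",
      ["language", "capital", "capital_status", "tld", "flag", "culture", "miscellaneous"]),
   ("Environment & landscape",
      ["coverage", "foliage", "topography", "environment", "infrastructure"]),
   ("Roads & transportation",
      ["cars", "driving", "signs", "bollards", "poles", "stop"])]

-- literal port of A: dict comprehension of empty dicts, then for each clue an inner
-- first-match scan over CATEGORIES (the for-with-break is List.find? on the same list),
-- mutating the matching category's inner dict
def categorize_clues (clues : List (String × String)) : List (String × List (String × String)) :=
  let init : PySem.Dict String (PySem.Dict String String) :=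
    pvCATEGORIES.foldl (fun d p => d.insert p.1 PySem.Dict.empty) PySem.Dict.empty
  let final : PySem.Dict String (PySem.Dict String String) :=
    clues.foldl (fun d kv =>
      match pvCATEGORIES.find? (fun p => p.2.contains kv.1) with
      | some p => d.modify p.1 PySem.Dict.empty (fun inner => inner.insert kv.1 kv.2)
      | none => d) init
  final.items.map (fun p => (p.1, p.2.items))

-- ===== PORT B =====
-- literal port of B: one comprehension over CATEGORIES; the inner dict comprehension
-- '{k: v for k, v in clues.items() if k in fields}' is a fold of insert over the filter
def categorize_clues_alt (clues : List (String × String)) : List (String × List (String × String)) :=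
  pvCATEGORIES.map (fun p =>
    (p.1,
      ((clues.filter (fun kv => p.2.contains kv.1)).foldl
        (fun d kv => d.insert kv.1 kv.2) PySem.Dict.empty).items))

-- ===== PRECONDITION & SPEC =====
def Spec_categorize_clues (clues : List (String × String)) (out : List (String × List (String × String))) : Prop := out = categorize_clues_alt clues
instance (clues : List (String × String)) (out : List (String × List (String × String))) : Decidable (Spec_categorize_clues clues out) := by unfold Spec_categorize_clues; infer_instance

-- ===== CLAIM (what is proved, stated in full; the proofs are below) =====
def Claim_equal_categorize_clues : Prop := ∀ (clues : List (String × String)), Dom_categorize_clues clues → Spec_categorize_clues clues (categorize_clues clues)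

-- ===== LEMMAS AND PROOFS =====

set_option maxRecDepth 4000

-- the three field lists are pairwise disjoint
theorem pv_disj12 (k : String) (h : (["language", "capital", "capital_status", "tld", "flag", "culture", "miscellaneous"] : List String).contains k = true) :
    (["coverage", "foliage", "topography", "environment", "infrastructure"] : List String).contains k = false := by
  simp only [List.contains_eq_mem, decide_eq_true_eq, decide_eq_false_iff_not] at *
  fin_cases h <;> decide

theorem pv_disj13 (k : String) (h : (["language", "capital", "capital_status", "tld", "flag", "culture", "miscellaneous"] : List String).contains k = true) :
    (["cars", "driving", "signs", "bollards", "poles", "stop"] : List String).contains k = false := by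
  simp only [List.contains_eq_mem, decide_eq_true_eq, decide_eq_false_iff_not] at *
  fin_cases h <;> decide

theorem pv_disj23 (k : String) (h : (["coverage", "foliage", "topography", "environment", "infrastructure"] : List String).contains k = true) :
    (["cars", "driving", "signs", "bollards", "poles", "stop"] : List String).contains k = false := by
  simp only [List.contains_eq_mem, decide_eq_true_eq, decide_eq_false_iff_not] at *
  fin_cases h <;> decide

-- A's loop over a three-entry outer dict computes, per category, the insert-fold of the filter
theorem pv_loopA (clues : List (String × String))
    (d1 d2 d3 : PySem.Dict String String) :
    clues.foldl (fun d kv =>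
      match pvCATEGORIES.find? (fun p => p.2.contains kv.1) with
      | some p => d.modify p.1 PySem.Dict.empty (fun inner => inner.insert kv.1 kv.2)
      | none => d)
      (PySem.Dict.mk [("Identity & symbols", d1), ("Environment & landscape", d2),
                      ("Roads & transportation", d3)]) =
    PySem.Dict.mk
      [("Identity & symbols",
          (clues.filter (fun kv => (["language", "capital", "capital_status", "tld", "flag", "culture", "miscellaneous"] : List String).contains kv.1)).foldl
            (fun d kv => d.insert kv.1 kv.2) d1),
       ("Environment & landscape",
          (clues.filter (fun kv => (["coverage", "foliage", "topography", "environment", "infrastructure"] : List String).contains kv.1)).foldl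
            (fun d kv => d.insert kv.1 kv.2) d2),
       ("Roads & transportation",
          (clues.filter (fun kv => (["cars", "driving", "signs", "bollards", "poles", "stop"] : List String).contains kv.1)).foldl
            (fun d kv => d.insert kv.1 kv.2) d3)] := by
  induction clues generalizing d1 d2 d3 with
  | nil => rfl
  | cons kv rest ih =>
    rcases hb1 : (["language", "capital", "capital_status", "tld", "flag", "culture", "miscellaneous"] : List String).contains kv.1 with _ | _
    · rcases hb2 : (["coverage", "foliage", "topography", "environment", "infrastructure"] : List String).contains kv.1 with _ | _
      · rcases hb3 : (["cars", "driving", "signs", "bollards", "poles", "stop"] : List String).contains kv.1 with _ | _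
        · -- no category matches
          simp only [List.foldl_cons, List.filter_cons, pvCATEGORIES, List.find?, hb1, hb2, hb3]
          exact ih d1 d2 d3
        · -- third category matches
          simp only [List.foldl_cons, List.filter_cons, pvCATEGORIES, List.find?, hb1, hb2, hb3]
          rw [show (PySem.Dict.mk [("Identity & symbols", d1), ("Environment & landscape", d2),
                ("Roads & transportation", d3)]).modify "Roads & transportation" PySem.Dict.empty
                (fun inner => inner.insert kv.1 kv.2) =
              PySem.Dict.mk [("Identity & symbols", d1), ("Environment & landscape", d2),
                ("Roads & transportation", d3.insert kv.1 kv.2)] from by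
            simp [PySem.Dict.modify, PySem.Dict.contains, PySem.Dict.getD, PySem.Dict.insert]; rfl]
          exact ih d1 d2 (d3.insert kv.1 kv.2)
      · -- second category matches (so the third does not)
        simp only [List.foldl_cons, List.filter_cons, pvCATEGORIES, List.find?, hb1, hb2,
          pv_disj23 kv.1 hb2]
        rw [show (PySem.Dict.mk [("Identity & symbols", d1), ("Environment & landscape", d2),
              ("Roads & transportation", d3)]).modify "Environment & landscape" PySem.Dict.empty
              (fun inner => inner.insert kv.1 kv.2) =
            PySem.Dict.mk [("Identity & symbols", d1), ("Environment & landscape", d2.insert kv.1 kv.2),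
              ("Roads & transportation", d3)] from by
          simp [PySem.Dict.modify, PySem.Dict.contains, PySem.Dict.getD, PySem.Dict.insert]; rfl]
        exact ih d1 (d2.insert kv.1 kv.2) d3
    · -- first category matches (so the others do not)
      simp only [List.foldl_cons, List.filter_cons, pvCATEGORIES, List.find?, hb1,
        pv_disj12 kv.1 hb1, pv_disj13 kv.1 hb1]
      rw [show (PySem.Dict.mk [("Identity & symbols", d1), ("Environment & landscape", d2),
            ("Roads & transportation", d3)]).modify "Identity & symbols" PySem.Dict.empty
            (fun inner => inner.insert kv.1 kv.2) =
          PySem.Dict.mk [("Identity & symbols", d1.insert kv.1 kv.2), ("Environment & landscape", d2),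
            ("Roads & transportation", d3)] from by
        simp [PySem.Dict.modify, PySem.Dict.contains, PySem.Dict.getD, PySem.Dict.insert]; rfl]
      exact ih (d1.insert kv.1 kv.2) d2 d3

-- ===== VERDICT (by name: the statement is the Claim_ definition above) =====
theorem categorize_clues_spec : Claim_equal_categorize_clues := by
  intro clues _
  unfold Spec_categorize_clues
  show (clues.foldl (fun d kv =>
      match pvCATEGORIES.find? (fun p => p.2.contains kv.1) with
      | some p => d.modify p.1 PySem.Dict.empty (fun inner => inner.insert kv.1 kv.2)
      | none => d)
      (PySem.Dict.mk [("Identity & symbols", PySem.Dict.empty),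
        ("Environment & landscape", PySem.Dict.empty),
        ("Roads & transportation", PySem.Dict.empty)])).items.map (fun p => (p.1, p.2.items)) =
    categorize_clues_alt clues
  rw [pv_loopA]
  rfl
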